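-- pv_equiv track=rewrite | github.com/filiphajduch420/ADFGVXCypher | main.py | replaceNumbersDecrypt
-- ===== SOURCE A (Python) =====
-- def replaceNumbersDecrypt(text):
--     number_table = {
--         'QABQ': '0',
--         'QBAQ': '1',
--         'QABY': '2',
--         'YABQ': '3',
--         'YABY': '4',
--         'YBAY': '5',
--         'XABY': '6',
--         'XABX': '7',
--         'YABX': '8',
--         'XBAX': '9'
--     }
--     replaced_text = ""
--
--     i = 0
--     while i < len(text):
--         substring = text[i:i + 4]
--         if substring in number_table:
--             replaced_text += number_table[substring]
--             i += 4
--         else: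
--             replaced_text += text[i]
--             i += 1
--
--     return replaced_text
-- ===== SOURCE B (Python) =====
-- def _settle(number_table, prefixes, out, buf):
--     # drop leading chars of buf until it is a full code (emit its digit) or a
--     # strict prefix of a code (keep waiting for more input); appends to out,
--     # returns the remaining buffer
--     if buf in number_table:
--         out.append(number_table[buf])
--         return ''
--     if buf in prefixes:
--         return buf
--     out.append(buf[0])
--     return _settle(number_table, prefixes, out, buf[1:])
--
--
-- def replaceNumbersDecrypt(text):
--     number_table = {
--         'QABQ': '0',
--         'QBAQ': '1',
--         'QABY': '2',
--         'YABQ': '3',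
--         'YABY': '4',
--         'YBAY': '5',
--         'XABY': '6',
--         'XABX': '7',
--         'YABX': '8',
--         'XBAX': '9'
--     }
--     # every strict prefix of a code (including ''): the states of a streaming matcher
--     prefixes = {code[:k] for code in number_table for k in range(4)}
--     out, buf = [], ''
--     for c in text:
--         buf = _settle(number_table, prefixes, out, buf + c)
--     return ''.join(out) + buf
-- ===== Notes on version B (the rewrite author's own statement) =====
-- stated objective: alternative
-- what changed: Replaces A's index-stepping while-loop (re-slicing text[i:i+4] at every position and jumping 4 or 1) with a single streaming left-to-right pass that maintains a buffer of pending characters forming a strict prefix of some code, emitting the digit when a code completes and flushing the buffer head on mismatch.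
import Mathlib
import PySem

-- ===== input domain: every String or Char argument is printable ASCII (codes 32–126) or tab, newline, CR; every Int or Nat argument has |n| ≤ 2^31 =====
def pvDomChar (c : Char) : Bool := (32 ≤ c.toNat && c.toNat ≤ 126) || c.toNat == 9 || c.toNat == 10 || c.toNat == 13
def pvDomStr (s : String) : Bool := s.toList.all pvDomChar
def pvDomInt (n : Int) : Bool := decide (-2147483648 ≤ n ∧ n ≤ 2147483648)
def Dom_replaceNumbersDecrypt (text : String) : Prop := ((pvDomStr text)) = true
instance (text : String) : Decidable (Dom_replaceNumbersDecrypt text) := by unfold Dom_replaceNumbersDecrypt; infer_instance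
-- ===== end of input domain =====

-- B replaces A's index-stepping while-loop (re-slice text[i:i+4], test, jump 4 or 1) by a
-- single streaming pass keeping a buffer of pending characters that form a strict prefix
-- of a code, emitting a digit when a code completes (objective: alternative).

-- ===== PORT A =====
-- the dict 'number_table' (str keys/values as char lists under the String ↔ List Char bridge)
def replTable : PySem.Dict (List Char) (List Char) :=
  PySem.Dict.ofList
    [ (['Q','A','B','Q'], ['0']), (['Q','B','A','Q'], ['1']), (['Q','A','B','Y'], ['2'])
    , (['Y','A','B','Q'], ['3']), (['Y','A','B','Y'], ['4']), (['Y','B','A','Y'], ['5'])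
    , (['X','A','B','Y'], ['6']), (['X','A','B','X'], ['7']), (['Y','A','B','X'], ['8'])
    , (['X','B','A','X'], ['9']) ]

-- A's while loop: the suffix text[i:] is the remaining list, text[i:i+4] its take 4,
-- 'i += 4' / 'i += 1' drop 4 / drop 1; replaced_text is the accumulator
def replLoopA (s acc : List Char) : List Char :=
  match s with
  | [] => acc
  | c :: cs =>
    let substring := (c :: cs).take 4
    match PySem.Dict.get? replTable substring with
    | some d => replLoopA ((c :: cs).drop 4) (acc ++ d)
    | none => replLoopA cs (acc ++ [c])
termination_by s.length
decreasing_by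
  · simp
  · simp

def replaceNumbersDecrypt (text : String) : String :=
  String.ofList (replLoopA text.toList [])

-- ===== PORT B =====
-- Source B's number_table is the same literal dict as A's; replTable is reused for it
-- prefixes = {code[:k] for code in number_table for k in range(4)}
def altPrefixes : PySem.Set (List Char) :=
  PySem.Set.ofList ((PySem.Dict.keys replTable).flatMap (fun code => (List.range 4).map (fun k => code.take k)))

-- _settle: drop leading chars of buf until it is a code (emit digit, clear buf)
-- or a strict prefix of a code (keep it)
def settleB (tbl : PySem.Dict (List Char) (List Char)) (pre : PySem.Set (List Char))
    (out buf : List Char) : List Char × List Char :=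
  if PySem.Dict.contains tbl buf then (out ++ [PySem.Dict.getD tbl buf []].flatten, [])
  else if PySem.Set.contains pre buf then (out, buf)
  else
    match buf with
    | [] => (out, [])          -- unreachable: '' is in prefixes
    | x :: xs => settleB tbl pre (out ++ [x]) xs

def replaceNumbersDecrypt_alt (text : String) : String :=
  let st := text.toList.foldl (fun (s : List Char × List Char) c => settleB replTable altPrefixes s.1 (s.2 ++ [c])) ([], [])
  String.ofList (st.1 ++ st.2)

-- ===== PRECONDITION & SPEC =====
def Spec_replaceNumbersDecrypt (text : String) (out : String) : Prop := out = replaceNumbersDecrypt_alt text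
instance (text : String) (out : String) : Decidable (Spec_replaceNumbersDecrypt text out) := by unfold Spec_replaceNumbersDecrypt; infer_instance

-- ===== CLAIM (what is proved, stated in full; the proofs are below) =====
def Claim_equal_replaceNumbersDecrypt : Prop := ∀ (text : String), Dom_replaceNumbersDecrypt text → Spec_replaceNumbersDecrypt text (replaceNumbersDecrypt text)

-- ===== LEMMAS AND PROOFS =====

-- the ten codes as a plain list
def codeList : List (List Char) :=
  [ ['Q','A','B','Q'], ['Q','B','A','Q'], ['Q','A','B','Y'], ['Y','A','B','Q'], ['Y','A','B','Y']
  , ['Y','B','A','Y'], ['X','A','B','Y'], ['X','A','B','X'], ['Y','A','B','X'], ['X','B','A','X'] ]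

lemma contains_replTable_iff (b : List Char) :
    PySem.Dict.contains replTable b = true ↔ b ∈ codeList := by
  rw [PySem.Dict.contains_iff_mem_keys]
  have h : PySem.Dict.keys replTable = codeList := by decide
  rw [h]

lemma length_of_code {b : List Char} (h : PySem.Dict.contains replTable b = true) :
    b.length = 4 := by
  rw [contains_replTable_iff] at h
  exact (by decide : ∀ x ∈ codeList, x.length = 4) b h

lemma viable_length {b : List Char} (h : PySem.Set.contains altPrefixes b = true) :
    b.length < 4 := by
  rw [PySem.Set.contains_iff] at h
  exact (by decide : ∀ x ∈ altPrefixes, x.length < 4) b h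

-- accumulator lemma for A's loop
lemma replLoopA_acc (s acc : List Char) : replLoopA s acc = acc ++ replLoopA s [] := by
  have H : ∀ n (s : List Char), s.length ≤ n → ∀ acc, replLoopA s acc = acc ++ replLoopA s [] := by
    intro n
    induction n with
    | zero =>
      intro s hs acc
      have hs0 : s = [] := by cases s <;> simp_all
      subst hs0; simp [replLoopA]
    | succ n ih =>
      intro s hs acc
      cases s with
      | nil => simp [replLoopA]
      | cons c cs =>
        rw [replLoopA]
        conv_rhs => rw [replLoopA]
        cases hd : PySem.Dict.get? replTable ((c :: cs).take 4) with
        | some d =>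
          simp only []
          rw [ih ((c :: cs).drop 4) (by simp at hs ⊢; omega) (acc ++ d),
              ih ((c :: cs).drop 4) (by simp at hs ⊢; omega) ([] ++ d)]
          simp
        | none =>
          simp only []
          rw [ih cs (by simp at hs; omega) (acc ++ [c]), ih cs (by simp at hs; omega) ([] ++ [c])]
          simp
  exact H s.length s le_rfl acc

-- A's loop copies a tail shorter than any code unchanged
lemma replLoopA_short (s : List Char) (h : s.length < 4) : replLoopA s [] = s := by
  induction s with
  | nil => simp [replLoopA]
  | cons c cs ih =>
    have hc : PySem.Dict.contains replTable ((c :: cs).take 4) = false := by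
      by_contra hx
      rw [Bool.not_eq_false] at hx
      have := length_of_code hx
      simp [List.length_take] at this
      simp at h
      omega
    have hd : PySem.Dict.get? replTable ((c :: cs).take 4) = none := by
      rw [← PySem.Dict.get?_eq_none_iff_contains] at hc
      exact hc
    rw [replLoopA]
    simp only [hd]
    rw [replLoopA_acc]
    rw [ih (by simp at h; omega)]
    simp

-- accumulator lemma for B's inner loop
lemma settleB_acc (tbl : PySem.Dict (List Char) (List Char)) (pre : PySem.Set (List Char))
    (buf : List Char) : ∀ out,
    settleB tbl pre out buf = (out ++ (settleB tbl pre [] buf).1, (settleB tbl pre [] buf).2) := by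
  induction buf with
  | nil =>
    intro out
    rw [settleB]
    conv_rhs => rw [settleB]
    split_ifs <;> simp
  | cons x xs ih =>
    intro out
    rw [settleB]
    conv_rhs => rw [settleB]
    split_ifs with h1 h2
    · simp
    · simp
    · rw [ih (out ++ [x]), ih ([] ++ [x])]
      simp

-- no extension of a non-viable, non-code buffer (of length ≤ 4) starts with a code
lemma no_code_ext {b : List Char} (hb : b.length ≤ 4)
    (hc : PySem.Dict.contains replTable b = false)
    (hv : PySem.Set.contains altPrefixes b = false) (r : List Char) :
    PySem.Dict.contains replTable ((b ++ r).take 4) = false := by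
  by_contra hx
  rw [Bool.not_eq_false, contains_replTable_iff] at hx
  have hb' : ((b ++ r).take 4).take b.length = b := by
    rw [List.take_take]
    have hm : min b.length 4 = b.length := by omega
    rw [hm, List.take_append_of_le_length le_rfl, List.take_length]
  have hmem : b ∈ codeList.flatMap (fun K => (List.range 5).map fun k => K.take k) := by
    rw [List.mem_flatMap]
    refine ⟨(b ++ r).take 4, hx, ?_⟩
    rw [List.mem_map]
    exact ⟨b.length, by rw [List.mem_range]; omega, hb'⟩
  have hall : ∀ x ∈ codeList.flatMap (fun K => (List.range 5).map fun k => K.take k),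
      (PySem.Dict.contains replTable x || PySem.Set.contains altPrefixes x) = true := by
    set_option maxRecDepth 10000 in decide
  have hor := hall b hmem
  rw [hc, hv] at hor
  simp at hor

-- B's inner loop performs exactly A's steps on the buffer head of the stream
lemma settle_spec (b : List Char) : b.length ≤ 4 → ∀ r : List Char,
    replLoopA (b ++ r) [] =
      (settleB replTable altPrefixes [] b).1 ++ replLoopA ((settleB replTable altPrefixes [] b).2 ++ r) []
    ∧ PySem.Set.contains altPrefixes (settleB replTable altPrefixes [] b).2 = true := by
  induction b with
  | nil =>
    intro _ r
    rw [settleB]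
    rw [if_neg (by decide : ¬ (PySem.Dict.contains replTable ([] : List Char) = true)),
        if_pos (by decide : PySem.Set.contains altPrefixes ([] : List Char) = true)]
    exact ⟨by simp, by decide⟩
  | cons x xs ih =>
    intro hb r
    rw [settleB]
    split_ifs with h1 h2
    · -- buf is a code: A consumes 4 chars and emits the digit
      have h1' : PySem.Dict.contains replTable (x :: xs) = true := h1
      have hlen : (x :: xs).length = 4 := length_of_code h1'
      cases hv : PySem.Dict.get? replTable (x :: xs) with
      | none =>
        rw [PySem.Dict.get?_eq_none_iff_contains] at hv
        rw [hv] at h1'; cases h1'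
      | some v =>
        have ht : ((x :: xs) ++ r).take 4 = x :: xs := by
          rw [List.take_append_of_le_length (by omega), List.take_of_length_le (by omega)]
        have hdr : ((x :: xs) ++ r).drop 4 = r := by
          rw [List.drop_append_of_le_length (by omega), List.drop_of_length_le (by omega)]
          simp
        constructor
        · have hxr : (x :: xs) ++ r = x :: (xs ++ r) := rfl
          rw [hxr] at ht hdr ⊢
          rw [replLoopA]
          simp only [ht, hv, hdr]
          rw [replLoopA_acc]
          have hg : PySem.Dict.getD replTable (x :: xs) [] = v := by
            simp [PySem.Dict.getD, hv]
          simp [hg]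
        · show PySem.Set.contains altPrefixes ([] : List Char) = true
          decide
    · -- buf is a strict prefix of a code: A is not looked at yet
      exact ⟨by simp, h2⟩
    · -- mismatch: A copies the head char; recurse on the rest of the buffer
      have h1' : PySem.Dict.contains replTable (x :: xs) = false := by
        simpa using h1
      have h2' : PySem.Set.contains altPrefixes (x :: xs) = false := by
        simpa using h2
      have hnc := no_code_ext hb h1' h2' r
      have hd : PySem.Dict.get? replTable (((x :: xs) ++ r).take 4) = none := by
        rw [← PySem.Dict.get?_eq_none_iff_contains] at hnc
        exact hnc
      have hstep : replLoopA ((x :: xs) ++ r) [] = [x] ++ replLoopA (xs ++ r) [] := by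
        have hd' : PySem.Dict.get? replTable ((x :: (xs ++ r)).take 4) = none := by
          simpa using hd
        rw [List.cons_append, replLoopA]
        simp only [hd']
        rw [replLoopA_acc]
        simp
      obtain ⟨ihA, ihV⟩ := ih (by simp at hb ⊢; omega) r
      rw [settleB_acc replTable altPrefixes xs ([] ++ [x])]
      constructor
      · rw [hstep, ihA]
        simp
      · simpa using ihV

-- the invariant of B's fold over the input stream
lemma main_inv (input : List Char) : ∀ (out b : List Char),
    PySem.Set.contains altPrefixes b = true →
    (let st := input.foldl (fun (s : List Char × List Char) c => settleB replTable altPrefixes s.1 (s.2 ++ [c])) (out, b)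
     st.1 ++ st.2) = out ++ replLoopA (b ++ input) [] := by
  induction input with
  | nil =>
    intro out b hb
    simp only [List.foldl_nil, List.append_nil]
    rw [replLoopA_short b (viable_length hb)]
  | cons c rest ih =>
    intro out b hb
    have hb4 : (b ++ [c]).length ≤ 4 := by
      have := viable_length hb
      simp
      omega
    obtain ⟨hA, hV⟩ := settle_spec (b ++ [c]) hb4 rest
    simp only [List.foldl_cons]
    rw [settleB_acc replTable altPrefixes (b ++ [c]) out]
    rw [ih (out ++ (settleB replTable altPrefixes [] (b ++ [c])).1)
          (settleB replTable altPrefixes [] (b ++ [c])).2 hV]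
    rw [List.append_assoc, ← hA]
    simp

-- ===== VERDICT (by name: the statement is the Claim_ definition above) =====
theorem replaceNumbersDecrypt_spec : Claim_equal_replaceNumbersDecrypt := by
  intro text _
  unfold Spec_replaceNumbersDecrypt replaceNumbersDecrypt replaceNumbersDecrypt_alt
  have h := main_inv text.toList [] [] (by decide)
  simp only at h
  exact congrArg String.ofList (by simpa using h.symm)
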